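-- pv_equiv track=rewrite | github.com/TerryLoopInfinity/medstats | backend/app/stats/logistic_reg_adjusted.py | _covs_label
-- ===== SOURCE A (Python) =====
-- def _covs_label(
--     expanded_cols: list[str],
--     dummy_map: dict[str, list[str]],
--     orig_covs: list[str],
-- ) -> str:
--     """将展开哑变量列名映射回原始变量名，返回逗号分隔字符串。"""
--     seen = []
--     for v in orig_covs:
--         if v in dummy_map:
--             if any(dc in expanded_cols for dc in dummy_map[v]):
--                 seen.append(v)
--         elif v in expanded_cols:
--             seen.append(v)
--     return ", ".join(seen)
-- ===== SOURCE B (Python) =====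
-- def _covs_label(
--     expanded_cols: list[str],
--     dummy_map: dict[str, list[str]],
--     orig_covs: list[str],
-- ) -> str:
--     # reverse index: dummy column name -> list of owning covariates
--     owners: dict[str, list[str]] = {}
--     for v, dcs in dummy_map.items():
--         for dc in dcs:
--             owners.setdefault(dc, []).append(v)
--     # single pass over expanded_cols, accumulating the covariates that are present
--     present = set()
--     for col in expanded_cols:
--         present.update(owners.get(col, []))
--         if col not in dummy_map:
--             present.add(col)
--     return ", ".join(v for v in orig_covs if v in present)
-- ===== Notes on version B (the rewrite author's own statement) =====
-- stated objective: faster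
-- what changed: Instead of A's loop over orig_covs that rescans expanded_cols for every covariate, B builds a reverse index (dummy column -> owning covariates) once, makes a single pass over expanded_cols accumulating a 'present' set through that index, and finally joins orig_covs filtered by set membership; Pre_ only excludes association lists with duplicate keys in dummy_map, which cannot arise from a Python dict.
import Mathlib
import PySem

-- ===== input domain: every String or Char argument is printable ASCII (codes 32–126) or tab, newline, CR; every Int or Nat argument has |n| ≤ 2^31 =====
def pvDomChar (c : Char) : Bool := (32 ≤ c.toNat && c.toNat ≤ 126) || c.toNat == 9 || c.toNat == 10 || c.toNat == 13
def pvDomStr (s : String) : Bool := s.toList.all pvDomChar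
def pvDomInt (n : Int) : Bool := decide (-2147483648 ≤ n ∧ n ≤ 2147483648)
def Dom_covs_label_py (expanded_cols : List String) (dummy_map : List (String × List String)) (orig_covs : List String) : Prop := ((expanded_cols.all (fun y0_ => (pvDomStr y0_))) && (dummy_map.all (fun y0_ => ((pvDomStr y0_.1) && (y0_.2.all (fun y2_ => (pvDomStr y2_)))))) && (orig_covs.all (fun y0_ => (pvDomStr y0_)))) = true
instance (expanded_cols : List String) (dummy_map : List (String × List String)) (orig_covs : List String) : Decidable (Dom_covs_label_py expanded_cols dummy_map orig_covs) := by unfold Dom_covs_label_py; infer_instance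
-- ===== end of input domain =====

-- B builds a reverse index (dummy column -> owners) and makes ONE pass over expanded_cols instead of
-- A's per-covariate rescans of expanded_cols: objective = faster.

-- ===== PORT A =====
-- literal transliteration: loop over orig_covs with a `seen` accumulator, dict lookup + any-scan per covariate
def covs_label_py (expanded_cols : List String) (dummy_map : List (String × List String)) (orig_covs : List String) : String :=
  let seen : List String := orig_covs.foldl (fun seen v =>
    match (PySem.Dict.mk dummy_map).get? v with
    | some dcs => if dcs.any (fun dc => expanded_cols.contains dc) then seen ++ [v] else seen
    | none => if expanded_cols.contains v then seen ++ [v] else seen) []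
  PySem.Str.join ", " seen

-- ===== PORT B =====
-- literal transliteration of Source B: nested loop building owners (setdefault+append = Dict.modify with
-- default []), then one pass over expanded_cols building `present`, then a membership-filtered join
def covs_label_py_alt (expanded_cols : List String) (dummy_map : List (String × List String)) (orig_covs : List String) : String :=
  let owners : PySem.Dict String (List String) :=
    dummy_map.foldl (fun d p => p.2.foldl (fun d dc => d.modify dc [] (· ++ [p.1])) d) PySem.Dict.empty
  let present : PySem.Set String :=
    expanded_cols.foldl (fun s col =>
      let s1 := PySem.Set.update s (owners.getD col [])
      if (PySem.Dict.mk dummy_map).contains col then s1 else PySem.Set.add s1 col)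
      PySem.Set.empty
  PySem.Str.join ", " (orig_covs.filter (fun v => PySem.Set.contains present v))

-- ===== PRECONDITION & SPEC =====
-- Pre_ excludes association lists with duplicate keys in dummy_map, which cannot arise from a Python
-- dict (A's parameter is a dict, so every actual input has distinct keys).
def Pre_covs_label_py (expanded_cols : List String) (dummy_map : List (String × List String)) (orig_covs : List String) : Prop :=
  (dummy_map.map Prod.fst).Nodup
instance (expanded_cols : List String) (dummy_map : List (String × List String)) (orig_covs : List String) : Decidable (Pre_covs_label_py expanded_cols dummy_map orig_covs) := by unfold Pre_covs_label_py; infer_instance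

def pvWitness_covs_label_py : List String × (List (String × List String)) × List String :=
  (["a", "x"], [("g", ["a", "b"])], ["g", "x", "z"])

def Spec_covs_label_py (expanded_cols : List String) (dummy_map : List (String × List String)) (orig_covs : List String) (out : String) : Prop := out = covs_label_py_alt expanded_cols dummy_map orig_covs
instance (expanded_cols : List String) (dummy_map : List (String × List String)) (orig_covs : List String) (out : String) : Decidable (Spec_covs_label_py expanded_cols dummy_map orig_covs out) := by unfold Spec_covs_label_py; infer_instance

-- ===== CLAIM (what is proved, stated in full; the proofs are below) =====
def Claim_equal_covs_label_py : Prop := ∀ (expanded_cols : List String) (dummy_map : List (String × List String)) (orig_covs : List String), Dom_covs_label_py expanded_cols dummy_map orig_covs → Pre_covs_label_py expanded_cols dummy_map orig_covs → Spec_covs_label_py expanded_cols dummy_map orig_covs (covs_label_py expanded_cols dummy_map orig_covs)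

-- ===== LEMMAS AND PROOFS =====

-- the condition A's loop tests for a covariate v, as a Bool
def condA (expanded_cols : List String) (dummy_map : List (String × List String)) (v : String) : Bool :=
  match (PySem.Dict.mk dummy_map).get? v with
  | some dcs => dcs.any (fun dc => expanded_cols.contains dc)
  | none => expanded_cols.contains v

-- A's loop body is "append v iff condA v"
theorem aStep_eq (expanded_cols : List String) (dummy_map : List (String × List String)) :
    (fun (seen : List String) (v : String) =>
      match (PySem.Dict.mk dummy_map).get? v with
      | some dcs => if dcs.any (fun dc => expanded_cols.contains dc) then seen ++ [v] else seen
      | none => if expanded_cols.contains v then seen ++ [v] else seen)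
    = fun (seen : List String) (v : String) =>
        if condA expanded_cols dummy_map v then seen ++ [(fun (x : String) => x) v] else seen := by
  funext seen v
  unfold condA
  cases (PySem.Dict.mk dummy_map).get? v <;> rfl

-- with nodup keys, a pair in the list is exactly what get? returns
theorem mem_pair_iff_get? (dm : List (String × List String)) (hnd : (dm.map Prod.fst).Nodup)
    (v : String) (dcs : List String) :
    ((v, dcs) ∈ dm) ↔ (PySem.Dict.mk dm).get? v = some dcs := by
  have hk : (PySem.Dict.mk dm).keys.Nodup := by simpa [PySem.Dict.keys] using hnd
  constructor
  · intro h
    exact PySem.Dict.get?_of_mem_items (d := PySem.Dict.mk dm) h hk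
  · intro h
    exact PySem.Dict.mem_items_of_get?_eq_some (d := PySem.Dict.mk dm) h

-- the owners nested fold equals the flat fold over the (dc, v) pairs
theorem owners_eq_flat (dm : List (String × List String)) :
    dm.foldl (fun d p => p.2.foldl (fun d dc => d.modify dc [] (· ++ [p.1])) d) PySem.Dict.empty
      = (dm.flatMap (fun p => p.2.map (fun dc => (dc, p.1)))).foldl
          (fun d q => d.modify q.1 [] (· ++ [q.2])) PySem.Dict.empty := by
  rw [List.foldl_flatMap]
  congr 1
  funext d p
  rw [List.foldl_map]

-- membership in a value of the owners dict
theorem mem_owners_getD (dm : List (String × List String)) (col v : String) :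
    v ∈ (dm.foldl (fun d p => p.2.foldl (fun d dc => d.modify dc [] (· ++ [p.1])) d)
          PySem.Dict.empty).getD col []
      ↔ ∃ p ∈ dm, p.1 = v ∧ col ∈ p.2 := by
  rw [owners_eq_flat, PySem.Dict.getD_foldl_modify_append]
  simp only [PySem.Dict.getD_empty, List.nil_append, List.mem_map, List.mem_filter,
    List.mem_flatMap, beq_iff_eq]
  constructor
  · rintro ⟨q, ⟨⟨p, hp, dc, hdc, rfl⟩, hcol⟩, hv⟩
    exact ⟨p, hp, hv, hcol ▸ hdc⟩
  · rintro ⟨p, hp, hv, hcol⟩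
    exact ⟨(col, p.1), ⟨⟨p, hp, col, hcol, rfl⟩, rfl⟩, hv⟩

-- membership in B's `present` fold
theorem mem_presentFold (g : String → List String) (c : String → Bool) (l : List String)
    (s : PySem.Set String) (v : String) :
    (v ∈ l.foldl (fun s col =>
        let s1 := PySem.Set.update s (g col)
        if c col then s1 else PySem.Set.add s1 col) s)
      ↔ v ∈ s ∨ ∃ col ∈ l, v ∈ g col ∨ (c col = false ∧ v = col) := by
  induction l generalizing s with
  | nil => simp
  | cons col l ih =>
    simp only [List.foldl_cons, ih]
    by_cases hc : c col = true
    · simp only [hc, if_pos, PySem.Set.mem_update]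
      constructor
      · rintro (⟨h | h⟩ | ⟨x, hx, hh⟩)
        · exact Or.inl h
        · exact Or.inr ⟨col, List.mem_cons_self .., Or.inl h⟩
        · exact Or.inr ⟨x, List.mem_cons_of_mem col hx, hh⟩
      · rintro (h | ⟨x, hx, hh⟩)
        · exact Or.inl (Or.inl h)
        · rcases List.mem_cons.mp hx with rfl | hx
          · rcases hh with h | ⟨hcf, _⟩
            · exact Or.inl (Or.inr h)
            · rw [hc] at hcf; cases hcf
          · exact Or.inr ⟨x, hx, hh⟩
    · rw [if_neg hc]
      simp only [PySem.Set.mem_add, PySem.Set.mem_update]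
      constructor
      · rintro (⟨⟨h | h⟩ | h⟩ | ⟨x, hx, hh⟩)
        · exact Or.inl h
        · exact Or.inr ⟨col, List.mem_cons_self .., Or.inl h⟩
        · exact Or.inr ⟨col, List.mem_cons_self .., Or.inr ⟨Bool.eq_false_iff.mpr hc, h⟩⟩
        · exact Or.inr ⟨x, List.mem_cons_of_mem col hx, hh⟩
      · rintro (h | ⟨x, hx, hh⟩)
        · exact Or.inl (Or.inl (Or.inl h))
        · rcases List.mem_cons.mp hx with rfl | hx
          · rcases hh with h | ⟨_, rfl⟩
            · exact Or.inl (Or.inl (Or.inr h))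
            · exact Or.inl (Or.inr rfl)
          · exact Or.inr ⟨x, hx, hh⟩

-- main pointwise lemma: B's `present` membership test equals A's per-covariate condition
theorem present_iff_condA (expanded_cols : List String) (dm : List (String × List String))
    (hnd : (dm.map Prod.fst).Nodup) (v : String) :
    (PySem.Set.contains
      (expanded_cols.foldl (fun s col =>
        let s1 := PySem.Set.update s
          ((dm.foldl (fun d p => p.2.foldl (fun d dc => d.modify dc [] (· ++ [p.1])) d)
              PySem.Dict.empty).getD col [])
        if (PySem.Dict.mk dm).contains col then s1 else PySem.Set.add s1 col)
        PySem.Set.empty) v)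
      = condA expanded_cols dm v := by
  rw [Bool.eq_iff_iff, PySem.Set.contains_iff, mem_presentFold]
  have hmem : ∀ col, (v ∈ (dm.foldl (fun d p => p.2.foldl (fun d dc => d.modify dc [] (· ++ [p.1])) d)
          PySem.Dict.empty).getD col []) ↔ ∃ p ∈ dm, p.1 = v ∧ col ∈ p.2 := fun col => mem_owners_getD dm col v
  cases hg : (PySem.Dict.mk dm).get? v with
  | some dcs =>
    have hc : condA expanded_cols dm v = dcs.any (fun dc => expanded_cols.contains dc) := by
      unfold condA; rw [hg]
    have hvk : (PySem.Dict.mk dm).contains v = true := by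
      rw [PySem.Dict.contains_eq_isSome_get?, hg]; rfl
    rw [hc]
    constructor
    · rintro (h | ⟨col, hcol, h | ⟨hnc, rfl⟩⟩)
      · simp [PySem.Set.empty] at h
      · rcases (hmem col).mp h with ⟨p, hp, hpv, hcp⟩
        have : (PySem.Dict.mk dm).get? p.1 = some p.2 := (mem_pair_iff_get? dm hnd p.1 p.2).mp (by simpa using hp)
        rw [hpv, hg] at this
        injection this with hdcs
        simp only [List.any_eq_true, List.contains_eq_mem, decide_eq_true_eq]
        exact ⟨col, hdcs ▸ hcp, hcol⟩
      · rw [hvk] at hnc; cases hnc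
    · intro hany
      simp only [List.any_eq_true, List.contains_eq_mem, decide_eq_true_eq] at hany
      rcases hany with ⟨dc, hdc, hde⟩
      refine Or.inr ⟨dc, hde, Or.inl ((hmem dc).mpr ?_)⟩
      exact ⟨(v, dcs), (mem_pair_iff_get? dm hnd v dcs).mpr hg, rfl, hdc⟩
  | none =>
    have hc : condA expanded_cols dm v = expanded_cols.contains v := by
      unfold condA; rw [hg]
    have hvk : (PySem.Dict.mk dm).contains v = false := by
      rw [PySem.Dict.contains_eq_isSome_get?, hg]; rfl
    have hnokey : ∀ p ∈ dm, p.1 ≠ v := by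
      intro p hp hpv
      have : (PySem.Dict.mk dm).get? p.1 = some p.2 := (mem_pair_iff_get? dm hnd p.1 p.2).mp (by simpa using hp)
      rw [hpv, hg] at this; cases this
    rw [hc]
    constructor
    · rintro (h | ⟨col, hcol, h | ⟨_, rfl⟩⟩)
      · simp [PySem.Set.empty] at h
      · rcases (hmem col).mp h with ⟨p, hp, hpv, _⟩
        exact absurd hpv (hnokey p hp)
      · simpa using hcol
    · intro hm
      refine Or.inr ⟨v, by simpa using hm, Or.inr ⟨hvk, rfl⟩⟩

-- ===== VERDICT (by name: the statement is the Claim_ definition above) =====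
theorem covs_label_py_spec : Claim_equal_covs_label_py := by
  intro expanded_cols dummy_map orig_covs _hdom hpre
  unfold Spec_covs_label_py covs_label_py covs_label_py_alt
  rw [aStep_eq, PySem.List.foldl_append_if]
  simp only [List.nil_append]
  congr 1
  simp only [List.map_id']
  apply List.filter_congr
  intro v _
  exact (present_iff_condA expanded_cols dummy_map hpre v).symm
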